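-- pv_equiv track=rewrite | github.com/mirelois/mirelois-LA2 | robot.py | robot_V1
-- ===== SOURCE A (Python) =====
-- def robot_V1(comandos):
--     d = [0,1] #vetor de direçao
--     max_min = [0,0,0,0] # [min x , min y, max x, max y]
--     r = list() # return
--     coords = [0,0]# current coordenates
--     for comando in comandos:
--         if comando == 'E':
--             d = [-d[1], d[0]] # x' = x.cos(t) - y.sin(t) ; y' = x.sin(t) + y.cos(t) t = 90
--         elif comando == 'D':
--             d = [d[1], -d[0]]# x' = x.cos(t) - y.sin(t) ; y' = x.sin(t) + y.cos(t) t = -90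
--         elif comando == 'A':
--             coords = list(map(lambda x,y: x+y, coords, d)) # coords + d
--             max_min = [min(coords[0],max_min[0]), min(coords[1],max_min[1]), max(coords[0],max_min[2]), max(coords[1],max_min[3])] # atualizaçao do max_min
--         elif comando == 'H':
--             r.append(tuple(max_min))#adicionar retangulo a r
--             max_min= [0,0,0,0]
--             coords = [0,0]
--             d = [0,1]#reset the robot
--     return r
-- ===== SOURCE B (Python) =====
-- def _bbox(segment):
--     d = [0, 1]
--     coords = [0, 0]
--     max_min = [0, 0, 0, 0]
--     for c in segment:
--         if c == 'E':
--             d = [-d[1], d[0]]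
--         elif c == 'D':
--             d = [d[1], -d[0]]
--         elif c == 'A':
--             coords = [coords[0] + d[0], coords[1] + d[1]]
--             max_min = [min(coords[0], max_min[0]), min(coords[1], max_min[1]),
--                        max(coords[0], max_min[2]), max(coords[1], max_min[3])]
--     return tuple(max_min)
--
-- def robot_V1(comandos):
--     # split into 'H'-terminated segments; the trailing unterminated segment emits nothing
--     segments = []
--     seg = []
--     for c in comandos:
--         if c == 'H':
--             segments.append(seg)
--             seg = []
--         else:
--             seg.append(c)
--     return [_bbox(s) for s in segments]
-- ===== Notes on version B (the rewrite author's own statement) =====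
-- stated objective: alternative
-- what changed: B partitions the command list into 'H'-terminated segments first and then runs an independent bounding-box simulation per segment, instead of A's single flat loop that carries and resets all robot state inline.
import Mathlib
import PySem

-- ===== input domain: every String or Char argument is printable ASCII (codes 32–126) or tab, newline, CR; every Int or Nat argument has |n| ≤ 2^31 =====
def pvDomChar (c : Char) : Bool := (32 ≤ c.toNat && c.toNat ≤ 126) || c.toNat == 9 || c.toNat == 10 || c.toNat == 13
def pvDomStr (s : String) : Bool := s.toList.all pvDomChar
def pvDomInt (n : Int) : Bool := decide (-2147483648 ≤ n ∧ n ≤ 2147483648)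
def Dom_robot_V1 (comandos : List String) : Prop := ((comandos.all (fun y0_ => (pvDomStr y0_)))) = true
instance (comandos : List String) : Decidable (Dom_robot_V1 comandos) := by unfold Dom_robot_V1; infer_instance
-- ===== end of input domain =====

-- B splits the commands into 'H'-terminated segments and runs one small simulation per
-- segment, instead of A's single flat loop carrying and resetting all state inline (alternative decomposition).

-- ===== PORT A =====
-- literal transliteration of A's single stateful loop: state (d, max_min, r, coords)
def robotA_loop (d : Int × Int) (mm : Int × Int × Int × Int)
    (r : List (Int × Int × Int × Int)) (coords : Int × Int) :
    List String → List (Int × Int × Int × Int)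
  | [] => r
  | c :: rest =>
    if c == "E" then robotA_loop (-d.2, d.1) mm r coords rest
    else if c == "D" then robotA_loop (d.2, -d.1) mm r coords rest
    else if c == "A" then
      let coords' := (coords.1 + d.1, coords.2 + d.2)
      robotA_loop d (min coords'.1 mm.1, min coords'.2 mm.2.1,
                     max coords'.1 mm.2.2.1, max coords'.2 mm.2.2.2) r coords' rest
    else if c == "H" then robotA_loop (0, 1) (0, 0, 0, 0) (r ++ [mm]) (0, 0) rest
    else robotA_loop d mm r coords rest

def robot_V1 (comandos : List String) : List (Int × Int × Int × Int) :=
  robotA_loop (0, 1) (0, 0, 0, 0) [] (0, 0) comandos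

-- ===== PORT B =====
-- simulation state for one segment: (d, max_min, coords)
def robotB_step (s : (Int × Int) × (Int × Int × Int × Int) × (Int × Int)) (c : String) :
    (Int × Int) × (Int × Int × Int × Int) × (Int × Int) :=
  let d := s.1; let mm := s.2.1; let coords := s.2.2
  if c == "E" then ((-d.2, d.1), mm, coords)
  else if c == "D" then ((d.2, -d.1), mm, coords)
  else if c == "A" then
    let coords' := (coords.1 + d.1, coords.2 + d.2)
    (d, (min coords'.1 mm.1, min coords'.2 mm.2.1,
         max coords'.1 mm.2.2.1, max coords'.2 mm.2.2.2), coords')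
  else s

def robotB_init : (Int × Int) × (Int × Int × Int × Int) × (Int × Int) :=
  ((0, 1), (0, 0, 0, 0), (0, 0))

def robotB_bbox (segment : List String) : Int × Int × Int × Int :=
  (segment.foldl robotB_step robotB_init).2.1

-- split into 'H'-terminated segments; the trailing unterminated segment is dropped
def robotB_segs (seg : List String) : List String → List (List String)
  | [] => []
  | c :: rest =>
    if c == "H" then seg :: robotB_segs [] rest
    else robotB_segs (seg ++ [c]) rest

def robot_V1_alt (comandos : List String) : List (Int × Int × Int × Int) :=
  (robotB_segs [] comandos).map robotB_bbox

-- ===== PRECONDITION & SPEC =====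
def Spec_robot_V1 (comandos : List String) (out : List (Int × Int × Int × Int)) : Prop := out = robot_V1_alt comandos
instance (comandos : List String) (out : List (Int × Int × Int × Int)) : Decidable (Spec_robot_V1 comandos out) := by unfold Spec_robot_V1; infer_instance

-- ===== CLAIM (what is proved, stated in full; the proofs are below) =====
def Claim_equal_robot_V1 : Prop := ∀ (comandos : List String), Dom_robot_V1 comandos → Spec_robot_V1 comandos (robot_V1 comandos)

-- ===== LEMMAS AND PROOFS =====

-- intermediate form: emit the current max_min at each 'H', resetting to the fresh state
def segsWith (s : (Int × Int) × (Int × Int × Int × Int) × (Int × Int)) :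
    List String → List (Int × Int × Int × Int)
  | [] => []
  | c :: rest =>
    if c == "H" then s.2.1 :: segsWith robotB_init rest
    else segsWith (robotB_step s c) rest

lemma robotA_loop_eq_segsWith (cs : List String) :
    ∀ (d : Int × Int) (mm : Int × Int × Int × Int)
      (r : List (Int × Int × Int × Int)) (coords : Int × Int),
      robotA_loop d mm r coords cs = r ++ segsWith (d, mm, coords) cs := by
  induction cs with
  | nil => intro d mm r coords; simp [robotA_loop, segsWith]
  | cons c rest ih =>
    intro d mm r coords
    by_cases hE : c = "E"
    · subst hE; simp [robotA_loop, segsWith, robotB_step, ih]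
    · by_cases hD : c = "D"
      · subst hD; simp [robotA_loop, segsWith, robotB_step, ih]
      · by_cases hA : c = "A"
        · subst hA; simp [robotA_loop, segsWith, robotB_step, ih]
        · by_cases hH : c = "H"
          · subst hH
            simp [robotA_loop, segsWith, robotB_init, ih]
          · simp [robotA_loop, segsWith, robotB_step, hE, hD, hA, hH, ih]

lemma map_bbox_segs (cs : List String) :
    ∀ (seg : List String),
      (robotB_segs seg cs).map robotB_bbox =
        segsWith (seg.foldl robotB_step robotB_init) cs := by
  induction cs with
  | nil => intro seg; simp [robotB_segs, segsWith]
  | cons c rest ih =>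
    intro seg
    by_cases hH : c = "H"
    · subst hH
      simp [robotB_segs, segsWith, robotB_bbox, ih]
    · simp [robotB_segs, segsWith, hH, ih, List.foldl_append]

-- ===== VERDICT (by name: the statement is the Claim_ definition above) =====
theorem robot_V1_spec : Claim_equal_robot_V1 := by
  intro comandos _
  unfold Spec_robot_V1 robot_V1 robot_V1_alt
  rw [robotA_loop_eq_segsWith, map_bbox_segs]
  simp [robotB_init]
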